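-- pv_equiv track=rewrite | github.com/sunkyuj/ps | 프로그래머스/3/389481. 봉인된 주문/봉인된 주문.py | solution
-- ===== SOURCE A (Python) =====
-- def solution(n, bans):
--     # n 1000조, bans는 30만
--
--     answer = ''
--     alp_ord = { alp: i+1 for i,alp in enumerate("abcdefghijklmnopqrstuvwxyz")}
--
--     ban_nums = []
--     for ban in bans:
--         l = len(ban)
--         num = 0
--         for i in range(l):
--             c = ban[i]
--             ex = l-1-i
--             num += alp_ord[c] * 26**ex
--         ban_nums.append(num)
--
--     ban_nums.sort()
--
--     real = n
--     for num in ban_nums: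
--         if real >= num:
--             real+=1
--         else:
--             break
--
--     a,b = real,0
--     while a:
--         a,b = a//26, a%26
--         if b == 0:
--             b = 26
--             a -= 1
--         answer += chr(b+96)
--
--     return answer[::-1]
-- ===== SOURCE B (Python) =====
-- def _value(s):
--     # bijective base-26 value via Horner's rule
--     num = 0
--     for ch in s:
--         num = num * 26 + (ord(ch) - 96)
--     return num
--
--
-- def _count_le(nums, v):
--     c = 0
--     for x in nums:
--         if x <= v:
--             c += 1
--     return c
--
--
-- def _to_str(v):
--     # bijective base-26 string, built recursively
--     if v <= 0:
--         return ''
--     q, r = divmod(v - 1, 26)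
--     return _to_str(q) + chr(97 + r)
--
--
-- def solution(n, bans):
--     nums = [_value(b) for b in bans]
--     v = n
--     while True:
--         c = _count_le(nums, v)
--         if n + c == v:
--             return _to_str(v)
--         v = n + c
-- ===== Notes on version B (the rewrite author's own statement) =====
-- stated objective: alternative
-- what changed: B drops the sort-then-break-scan entirely: it values each ban by Horner's rule, then finds the answer as the least fixed point of v = n + count(bans <= v) by repeated jumping (each iteration counts banned values below the candidate and jumps straight to n + that count), and prints it with a recursive bijective base-26 conversion instead of A's append-then-reverse loop.
import Mathlib
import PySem

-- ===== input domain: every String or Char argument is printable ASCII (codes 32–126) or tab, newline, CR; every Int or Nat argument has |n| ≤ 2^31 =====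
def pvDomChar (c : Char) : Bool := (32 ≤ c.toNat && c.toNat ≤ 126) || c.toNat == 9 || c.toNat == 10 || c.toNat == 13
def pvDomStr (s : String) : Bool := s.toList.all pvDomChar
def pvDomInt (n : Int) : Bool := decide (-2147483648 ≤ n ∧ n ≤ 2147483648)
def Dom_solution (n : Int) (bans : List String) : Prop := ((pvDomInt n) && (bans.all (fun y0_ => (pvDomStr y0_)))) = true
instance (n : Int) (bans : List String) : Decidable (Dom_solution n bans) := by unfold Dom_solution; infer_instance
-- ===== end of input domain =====

-- B replaces A's sort + linear break-scan by an unsorted fixed-point jump iteration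
-- (v := n + count(bans ≤ v) until stable), Horner valuation and a recursive base-26 printer
-- (objective: alternative; same return value on Pre_).

-- ===== PORT A =====

-- { alp: i+1 for i,alp in enumerate("abcdefghijklmnopqrstuvwxyz") }
def pvAlpOrd : PySem.Dict Char Int :=
  (PySem.List.enumerate "abcdefghijklmnopqrstuvwxyz".toList 0).foldl
    (fun d p => d.insert p.2 (p.1 + 1)) PySem.Dict.empty

-- the inner 'for i in range(l)' loop computing one ban's number;
-- alp_ord[c] is ported with getD 0 (the KeyError inputs are excluded by Pre_),
-- 26**ex as 26 ^ ex.toNat (ex = l-1-i ≥ 0 always holds here)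
def pvBanNum (ban : String) : Int :=
  (PySem.List.pyRange 0 (PySem.Str.len ban) 1).foldl
    (fun num i =>
      num + pvAlpOrd.getD ((PySem.Str.pyGet? ban i).getD ' ') 0
              * 26 ^ (PySem.Str.len ban - 1 - i).toNat) 0

-- 'for num in ban_nums: if real >= num: real += 1 else: break'
def pvScan : Int → List Int → Int
  | real, [] => real
  | real, num :: rest => if real ≥ num then pvScan (real + 1) rest else real

-- 'while a: a,b = a//26, a%26; …; answer += chr(b+96)'; the fuel real.toNat + 1 and the
-- guard 'a ≤ 0' only make the loop total (a strictly decreases while positive, so the fuel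
-- is never exhausted; Python stops exactly at a = 0, and for a < 0 Python never terminates —
-- such inputs are excluded by Pre_)
def pvConvLoop : Nat → Int → List Char → List Char
  | 0, _, answer => answer
  | fuel + 1, a, answer =>
    if a ≤ 0 then answer
    else
      let b1 := PySem.Int.mod a 26
      let a2 := if b1 = 0 then PySem.Int.floordiv a 26 - 1 else PySem.Int.floordiv a 26
      let b2 := if b1 = 0 then (26 : Int) else b1
      pvConvLoop fuel a2 (answer ++ [Char.ofNat (b2 + 96).toNat])

def solution (n : Int) (bans : List String) : String :=
  let banNums := bans.foldl (fun acc ban => acc ++ [pvBanNum ban]) ([] : List Int)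
  let sortedNums := PySem.List.sorted banNums (fun x => x) false
  let real := pvScan n sortedNums
  String.ofList (pvConvLoop (real.toNat + 1) real []).reverse   -- answer[::-1]

-- ===== PORT B =====

-- Horner valuation: num = num*26 + (ord(ch) - 96)
def pvVal (s : String) : Int :=
  s.toList.foldl (fun num ch => num * 26 + ((ch.toNat : Int) - 96)) 0

-- _count_le: c = 0; for x in nums: if x <= v: c += 1
def pvCountLe (nums : List Int) (v : Int) : Int :=
  nums.foldl (fun c x => if x ≤ v then c + 1 else c) 0

-- the 'while True' fixed-point jump; fuel nums.length + 1 makes it total and is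
-- proved sufficient on Pre_ in the equivalence proof
def pvFix (nums : List Int) (n : Int) : Nat → Int → Int
  | 0, v => v
  | fuel + 1, v =>
    let c := pvCountLe nums v
    if n + c = v then v else pvFix nums n fuel (n + c)

-- _to_str: recursive bijective base-26 printer; the fuel v.toNat + 1 only totalizes the
-- recursion ((v-1)//26 strictly decreases while v is positive, so it is never exhausted)
def pvToStr : Nat → Int → List Char
  | 0, _ => []
  | fuel + 1, v =>
    if v ≤ 0 then []
    else pvToStr fuel (PySem.Int.floordiv (v - 1) 26)
           ++ [Char.ofNat (97 + PySem.Int.mod (v - 1) 26).toNat]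

def solution_alt (n : Int) (bans : List String) : String :=
  let nums := bans.map pvVal
  let w := pvFix nums n (nums.length + 1) n
  String.ofList (pvToStr (w.toNat + 1) w)

-- ===== PRECONDITION & SPEC =====

-- Pre_ excludes inputs where A never returns: a ban with a character outside 'a'..'z'
-- raises KeyError in alp_ord[c], and a negative n makes A's final 'while a' loop run forever.
def Pre_solution (n : Int) (bans : List String) : Prop :=
  0 ≤ n ∧ (bans.all (fun ban => ban.toList.all (fun c => 97 ≤ c.toNat && c.toNat ≤ 122))) = true
instance (n : Int) (bans : List String) : Decidable (Pre_solution n bans) := by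
  unfold Pre_solution; infer_instance

def pvWitness_solution : Int × List String := (5, ["ab", "z"])

def Spec_solution (n : Int) (bans : List String) (out : String) : Prop := out = solution_alt n bans
instance (n : Int) (bans : List String) (out : String) : Decidable (Spec_solution n bans out) := by unfold Spec_solution; infer_instance

-- ===== CLAIM (what is proved, stated in full; the proofs are below) =====
def Claim_equal_solution : Prop := ∀ (n : Int) (bans : List String), Dom_solution n bans → Pre_solution n bans → Spec_solution n bans (solution n bans)

-- ===== LEMMAS AND PROOFS =====

-- digit value used by B
def pvDig (c : Char) : Int := (c.toNat : Int) - 96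

-- positional value of a character list, most significant first
def pvPos : List Char → Int
  | [] => 0
  | c :: cs => pvDig c * 26 ^ cs.length + pvPos cs

-- banned-values-≤-v counter, as a countP
def pvCnt (nums : List Int) (v : Int) : Int := (nums.countP (fun x => decide (x ≤ v)) : Int)

set_option maxRecDepth 10000 in
theorem pvAlpOrd_getD_eq (c : Char) (h1 : 97 ≤ c.toNat) (h2 : c.toNat ≤ 122) :
    pvAlpOrd.getD c 0 = pvDig c := by
  have hofnat : Char.ofNat c.toNat = c := Char.ofNat_toNat c
  have h97 : 97 + (c.toNat - 97) = c.toNat := by omega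
  have hk : c.toNat - 97 ∈ List.range 26 := List.mem_range.mpr (by omega)
  rw [← hofnat, ← h97]
  generalize c.toNat - 97 = k at hk
  fin_cases hk <;> decide

set_option maxRecDepth 8192 in
theorem pvHorner (cs : List Char) : ∀ a : Int,
    cs.foldl (fun num ch => num * 26 + ((ch.toNat : Int) - 96)) a = a * 26 ^ cs.length + pvPos cs := by
  induction cs with
  | nil => intro a; simp [pvPos]
  | cons c cs ih =>
    intro a
    simp only [List.foldl_cons, ih, pvPos, List.length_cons, pvDig]
    ring

theorem pvVal_eq_pvPos (s : String) : pvVal s = pvPos s.toList := by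
  simpa using pvHorner s.toList 0

theorem pvPos_eq_sum (cs : List Char) :
    pvPos cs = ((List.range cs.length).map
      (fun k => pvDig (cs.getD k ' ') * 26 ^ (cs.length - 1 - k))).sum := by
  induction cs with
  | nil => simp [pvPos]
  | cons c cs ih =>
    simp only [pvPos, List.length_cons, List.range_succ_eq_map, List.map_cons, List.map_map,
      List.sum_cons, List.getD_cons_zero, Nat.sub_zero, Nat.add_sub_cancel]
    congr 1
    rw [ih]
    congr 1
    apply List.map_congr_left
    intro k _
    simp [Function.comp]
    ring_nf
    omega

theorem pvBanNum_eq_pvPos (ban : String)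
    (h : ∀ c ∈ ban.toList, 97 ≤ c.toNat ∧ c.toNat ≤ 122) :
    pvBanNum ban = pvPos ban.toList := by
  unfold pvBanNum
  rw [PySem.Str.len_eq, PySem.List.pyRange_one]
  rw [List.foldl_map, PySem.List.foldl_add]
  simp only [Int.sub_zero, Int.toNat_natCast, zero_add]
  rw [pvPos_eq_sum]
  congr 1
  apply List.map_congr_left
  intro k hk
  have hkL : k < ban.toList.length := List.mem_range.mp hk
  have hg : (PySem.Str.pyGet? ban (↑k : Int)).getD ' ' = ban.toList.getD k ' ' := by
    simp [PySem.Str.pyGet?, List.getD]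
  rw [hg]
  have hmem : ban.toList.getD k ' ' ∈ ban.toList := by
    rw [List.getD_eq_getElem _ _ hkL]
    exact List.getElem_mem hkL
  rw [pvAlpOrd_getD_eq _ (h _ hmem).1 (h _ hmem).2]
  congr 2
  omega

theorem pvScan_ge (l : List Int) : ∀ r : Int, r ≤ pvScan r l := by
  induction l with
  | nil => intro r; simp [pvScan]
  | cons x xs ih =>
    intro r
    simp only [pvScan]
    split
    · exact le_trans (by omega) (ih (r + 1))
    · omega

theorem pvScan_fix (l : List Int) (hpw : l.Pairwise (· ≤ ·)) :
    ∀ r : Int, pvScan r l = r + pvCnt l (pvScan r l) := by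
  induction l with
  | nil => intro r; simp [pvScan, pvCnt]
  | cons x xs ih =>
    intro r
    rcases List.pairwise_cons.mp hpw with ⟨hx, hxs⟩
    simp only [pvScan]
    split
    · rename_i hrx
      have hge := pvScan_ge xs (r + 1)
      have hih := ih hxs (r + 1)
      have hxle : decide (x ≤ pvScan (r + 1) xs) = true := by
        simp only [decide_eq_true_eq]; omega
      simp only [pvCnt, List.countP_cons, hxle, if_true] at *
      push_cast at *
      omega
    · rename_i hrx
      have h0 : xs.countP (fun y => decide (y ≤ r)) = 0 := by
        apply List.countP_eq_zero.mpr
        intro y hy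
        have := hx y hy
        simp only [decide_eq_true_eq] at *
        omega
      have hxf : decide (x ≤ r) = false := by
        simp only [decide_eq_false_iff_not]; omega
      simp [pvCnt, h0, hxf]

theorem pvScan_least (l : List Int) (hpw : l.Pairwise (· ≤ ·)) :
    ∀ r v : Int, r ≤ v → pvCnt l v ≤ v - r → pvScan r l ≤ v := by
  induction l with
  | nil => intro r v h _; simpa [pvScan] using h
  | cons x xs ih =>
    intro r v hrv hcnt
    rcases List.pairwise_cons.mp hpw with ⟨_, hxs⟩
    simp only [pvScan]
    split
    · rename_i hrx
      have hxv : decide (x ≤ v) = true := by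
        simp only [decide_eq_true_eq]; omega
      simp only [pvCnt, List.countP_cons, hxv, if_true] at hcnt
      push_cast at hcnt
      apply ih hxs (r + 1) v (by omega)
      simp only [pvCnt]
      omega
    · exact hrv

theorem pvCnt_nonneg (nums : List Int) (v : Int) : 0 ≤ pvCnt nums v := by
  simp [pvCnt]

theorem pvCnt_le_len (nums : List Int) (v : Int) : pvCnt nums v ≤ nums.length := by
  simp only [pvCnt]
  exact_mod_cast List.countP_le_length

theorem pvCnt_mono (nums : List Int) {v w : Int} (h : v ≤ w) : pvCnt nums v ≤ pvCnt nums w := by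
  simp only [pvCnt]
  have := List.countP_mono_left (l := nums)
    (p := fun x => decide (x ≤ v)) (q := fun x => decide (x ≤ w))
    (fun a _ ha => by simp at *; omega)
  exact_mod_cast this

theorem pvCountLe_eq (nums : List Int) (v : Int) : pvCountLe nums v = pvCnt nums v := by
  simp [pvCountLe, pvCnt, PySem.List.foldl_ite_add_one]

theorem pvFix_eq (nums : List Int) (n s : Int)
    (hfix : s = n + pvCnt nums s)
    (hleast : ∀ w, n ≤ w → pvCnt nums w ≤ w - n → s ≤ w) :
    ∀ (fuel : Nat) (v : Int), n ≤ v → v ≤ s → v ≤ n + pvCnt nums v →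
      (s - v).toNat < fuel → pvFix nums n fuel v = s := by
  intro fuel
  induction fuel with
  | zero => intro v _ _ _ h; omega
  | succ fuel ih =>
    intro v hnv hvs hpre hf
    simp only [pvFix, pvCountLe_eq]
    split
    · rename_i heq
      have : pvCnt nums v ≤ v - n := by omega
      have := hleast v hnv this
      omega
    · rename_i hne
      have hvlt : v < n + pvCnt nums v := lt_of_le_of_ne hpre (by omega)
      apply ih
      · have := pvCnt_nonneg nums v; omega
      · have := pvCnt_mono nums hvs; omega
      · have := pvCnt_mono nums (le_of_lt hvlt); omega
      · have := pvCnt_mono nums hvs; omega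

theorem pvConv_eq_toStr : ∀ (fuel : Nat) (v : Int), 0 ≤ v →
    ∀ acc : List Char, pvConvLoop fuel v acc = acc ++ (pvToStr fuel v).reverse := by
  intro fuel
  induction fuel with
  | zero =>
    intro v h0 acc
    simp [pvConvLoop, pvToStr]
  | succ fuel ih =>
    intro v h0 acc
    by_cases hle : v ≤ 0
    · simp only [pvConvLoop, pvToStr, if_pos hle]
      simp
    · simp only [pvConvLoop, pvToStr, if_neg hle]
      have hfd : PySem.Int.floordiv v 26 = v / 26 :=
        PySem.Int.floordiv_eq_ediv_of_pos (by norm_num)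
      have hfd2 : PySem.Int.floordiv (v - 1) 26 = (v - 1) / 26 :=
        PySem.Int.floordiv_eq_ediv_of_pos (by norm_num)
      have hmd : PySem.Int.mod v 26 = v % 26 :=
        PySem.Int.mod_eq_emod_of_pos (by norm_num)
      have hmd2 : PySem.Int.mod (v - 1) 26 = (v - 1) % 26 :=
        PySem.Int.mod_eq_emod_of_pos (by norm_num)
      simp only [hfd, hfd2, hmd, hmd2]
      by_cases hb : v % 26 = 0
      · have hq : (v - 1) / 26 = v / 26 - 1 := by omega
        have hr : (v - 1) % 26 = 25 := by omega
        have ha2 : (0:Int) ≤ v / 26 - 1 := by omega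
        rw [if_pos hb, if_pos hb, hq, hr, ih _ ha2]
        simp [List.reverse_append]
      · have hq : (v - 1) / 26 = v / 26 := by omega
        have hr : (v - 1) % 26 = v % 26 - 1 := by omega
        have ha2 : (0:Int) ≤ v / 26 := by omega
        rw [if_neg hb, if_neg hb, hq, hr, ih _ ha2]
        have hch : Char.ofNat (v % 26 + 96).toNat = Char.ofNat (97 + (v % 26 - 1)).toNat := by
          congr 1
          omega
        rw [hch]
        simp [List.reverse_append]

theorem solution_eq (n : Int) (bans : List String)
    (hn : 0 ≤ n)
    (hlow : ∀ ban ∈ bans, ∀ c ∈ ban.toList, 97 ≤ c.toNat ∧ c.toNat ≤ 122) :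
    solution n bans = solution_alt n bans := by
  simp only [solution, solution_alt]
  have hmap : bans.foldl (fun acc ban => acc ++ [pvBanNum ban]) ([] : List Int)
      = bans.map pvVal := by
    rw [PySem.List.foldl_append_singleton_eq_map]
    simp only [List.nil_append]
    apply List.map_congr_left
    intro ban hb
    rw [pvBanNum_eq_pvPos ban (hlow ban hb), ← pvVal_eq_pvPos]
  rw [hmap]
  set nums := bans.map pvVal with hnums
  set S := PySem.List.sorted nums (fun x => x) false with hS
  set s := pvScan n S with hs
  have hpw : S.Pairwise (· ≤ ·) := PySem.List.sorted_pairwise nums (fun x => x)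
  have hperm : S.Perm nums := PySem.List.sorted_perm nums (fun x => x) false
  have hcntS : ∀ v, pvCnt S v = pvCnt nums v := by
    intro v
    simp [pvCnt, hperm.countP_eq]
  have hge : n ≤ s := pvScan_ge S n
  have hfix : s = n + pvCnt nums s := by
    rw [← hcntS]
    exact pvScan_fix S hpw n
  have hleast : ∀ w, n ≤ w → pvCnt nums w ≤ w - n → s ≤ w := by
    intro w h1 h2
    exact pvScan_least S hpw n w h1 (by rw [hcntS]; exact h2)
  have hfuel : (s - n).toNat < nums.length + 1 := by
    have := pvCnt_le_len nums s
    omega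
  have hBfix : pvFix nums n (nums.length + 1) n = s :=
    pvFix_eq nums n s hfix hleast _ n le_rfl hge
      (by have := pvCnt_nonneg nums n; omega) hfuel
  rw [hBfix]
  rw [pvConv_eq_toStr (s.toNat + 1) s (by omega) []]
  simp

-- ===== VERDICT (by name: the statement is the Claim_ definition above) =====
theorem solution_spec : Claim_equal_solution := by
  intro n bans _ hpre
  obtain ⟨hn, hb⟩ := hpre
  apply solution_eq n bans hn
  intro ban hban c hc
  simp only [List.all_eq_true] at hb
  have h2 := hb ban hban c hc
  simp only [Bool.and_eq_true, decide_eq_true_eq] at h2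
  exact h2
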